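-- pv_equiv track=rewrite | github.com/michalmytych/CodeJam2020 | ParentingPartnering.py | CameronJamie
-- ===== SOURCE A (Python) =====
-- def CameronJamie(przedzialy):
--     # tworzę za pomocą list comprehension listę skladajaca sie z krotek + numer krotki
--     przedzialy = [(przedzialy[i][0], przedzialy[i][1], i) for i in range(len(przedzialy))]
--     # sortuję według czasu rozpoczęcia się zajęcia (lambda zwraca start)
--     przedzialy.sort(key=lambda x: x[0])
--     literyPlusNumer = []
--     kCameron = 0
--     kJamie = 0
--     # odwołuje się do krotek z listy przedzialy gdzie jest start,
--     # zakończenie oraz indeks krotki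
--     for start, koniec, numer in przedzialy:
--         if start < kCameron and start < kJamie:
--             return "IMPOSSIBLE"
--         elif start >= kCameron:
--             literyPlusNumer.append(("C", numer))
--             kCameron = koniec
--         else:
--             literyPlusNumer.append(("J", numer))
--             kJamie = koniec
--
--     # sortuję po indeksie
--     literyPlusNumer.sort(key=lambda x: x[1])
--     # łańcuch literek
--     ostateczny_lancuch = ''
--     for literka, numer in literyPlusNumer:
--         ostateczny_lancuch += literka
--
--     return ostateczny_lancuch
-- ===== SOURCE B (Python) =====
-- def CameronJamie(przedzialy):
--     indexed = sorted(((s, e, i) for i, (s, e) in enumerate(przedzialy)), key=lambda t: t[0])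
--     # stage 1: Cameron greedily takes every interval that fits his own chain
--     letters = {}
--     end = 0
--     leftover = []
--     for s, e, i in indexed:
--         if s >= end:
--             letters[i] = 'C'
--             end = e
--         else:
--             leftover.append((s, e, i))
--     # stage 2: the leftover intervals must themselves form a chain for Jamie
--     end = 0
--     for s, e, i in leftover:
--         if s < end:
--             return "IMPOSSIBLE"
--         letters[i] = 'J'
--         end = e
--     return ''.join(letters[i] for i in range(len(przedzialy)))
-- ===== Notes on version B (the rewrite author's own statement) =====
-- stated objective: alternative
-- what changed: B replaces A's single interleaved two-track sweep (tracking both schedulers' end times at once, then re-sorting (letter,index) pairs) with a two-stage decomposition: first extract Cameron's greedy chain alone, then verify that the leftover intervals form a valid chain for Jamie, assembling the answer from an index-keyed dict; this works because A's C-preference makes Cameron's assignments independent of Jamie's state.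
import Mathlib
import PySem

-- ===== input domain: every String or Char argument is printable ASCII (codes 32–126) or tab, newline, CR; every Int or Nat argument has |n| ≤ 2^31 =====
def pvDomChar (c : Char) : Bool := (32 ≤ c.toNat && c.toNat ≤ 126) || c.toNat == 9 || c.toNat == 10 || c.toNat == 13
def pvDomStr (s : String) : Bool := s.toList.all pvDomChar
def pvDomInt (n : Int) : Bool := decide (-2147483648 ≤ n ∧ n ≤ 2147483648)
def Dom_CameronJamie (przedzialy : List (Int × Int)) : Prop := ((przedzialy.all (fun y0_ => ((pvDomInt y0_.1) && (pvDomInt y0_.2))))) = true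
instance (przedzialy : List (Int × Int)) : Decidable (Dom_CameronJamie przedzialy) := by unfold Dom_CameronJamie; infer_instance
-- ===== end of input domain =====

-- B replaces A's single interleaved two-track sweep with a two-stage decomposition
-- (extract Cameron's greedy chain alone, then verify the leftovers chain for Jamie,
-- assembling via an index-keyed dict); objective: alternative algorithmic decomposition.

-- ===== PORT A =====
-- A's for-loop; none = the early 'return "IMPOSSIBLE"'
def pvLoopA : List (Int × Int × Int) → Int → Int → List (Char × Int) → Option (List (Char × Int))
  | [], _, _, acc => some acc
  | (start, koniec, numer) :: rest, kC, kJ, acc =>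
    if start < kC ∧ start < kJ then none
    else if kC ≤ start then pvLoopA rest koniec kJ (acc ++ [('C', numer)])
    else pvLoopA rest kC koniec (acc ++ [('J', numer)])

def CameronJamie (przedzialy : List (Int × Int)) : String :=
  -- [(przedzialy[i][0], przedzialy[i][1], i) for i in range(len(przedzialy))]
  let triples := (PySem.List.enumerate przedzialy).map (fun p => (p.2.1, p.2.2, p.1))
  let triples := PySem.List.sorted triples (fun x => x.1) false
  match pvLoopA triples 0 0 [] with
  | none => "IMPOSSIBLE"
  | some literyPlusNumer =>
    let s := PySem.List.sorted literyPlusNumer (fun x => x.2) false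
    -- ostateczny_lancuch: '' extended one letter at a time
    String.ofList (s.foldl (fun acc p => acc ++ [p.1]) [])

-- ===== PORT B =====
-- B's stage 1: Cameron greedily takes every interval that fits his own chain;
-- the others are appended, in order, to 'leftover'
def pvStage1 : List (Int × Int × Int) → Int → PySem.Dict Int Char → List (Int × Int × Int) →
    (PySem.Dict Int Char × List (Int × Int × Int))
  | [], _, letters, leftover => (letters, leftover)
  | (s, e, i) :: rest, kEnd, letters, leftover =>
    if kEnd ≤ s then pvStage1 rest e (letters.insert i 'C') leftover
    else pvStage1 rest kEnd letters (leftover ++ [(s, e, i)])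

-- B's stage 2: the leftovers must themselves form a chain for Jamie; none = 'return "IMPOSSIBLE"'
def pvStage2 : List (Int × Int × Int) → Int → PySem.Dict Int Char → Option (PySem.Dict Int Char)
  | [], _, letters => some letters
  | (s, e, i) :: rest, kEnd, letters =>
    if s < kEnd then none else pvStage2 rest e (letters.insert i 'J')

def CameronJamie_alt (przedzialy : List (Int × Int)) : String :=
  let indexed := PySem.List.sorted ((PySem.List.enumerate przedzialy).map (fun q => (q.2.1, q.2.2, q.1))) (fun t => t.1) false
  let r := pvStage1 indexed 0 PySem.Dict.empty []
  match pvStage2 r.2 0 r.1 with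
  | none => "IMPOSSIBLE"
  | some letters =>
    -- ''.join(letters[i] for i in range(len(przedzialy))): in the success case every index
    -- is a key of 'letters', so the lookup never misses and filterMap drops nothing
    String.ofList ((PySem.List.pyRange 0 przedzialy.length 1).filterMap (fun k => letters.get? k))

-- ===== PRECONDITION & SPEC =====
def Spec_CameronJamie (przedzialy : List (Int × Int)) (out : String) : Prop := out = CameronJamie_alt przedzialy
instance (przedzialy : List (Int × Int)) (out : String) : Decidable (Spec_CameronJamie przedzialy out) := by unfold Spec_CameronJamie; infer_instance

-- ===== CLAIM (what is proved, stated in full; the proofs are below) =====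
def Claim_equal_CameronJamie : Prop := ∀ (przedzialy : List (Int × Int)), Dom_CameronJamie przedzialy → Spec_CameronJamie przedzialy (CameronJamie przedzialy)

-- ===== LEMMAS AND PROOFS =====

-- spec-side helpers: the letter assigned to each triple by the C-greedy scan,
-- the Cameron-picked indices, the leftover (Jamie) triples, and the Jamie chain check
def pvLabels : List (Int × Int × Int) → Int → List (Char × Int)
  | [], _ => []
  | (s, e, i) :: rest, kC =>
    if kC ≤ s then ('C', i) :: pvLabels rest e else ('J', i) :: pvLabels rest kC

def pvCIdx : List (Int × Int × Int) → Int → List Int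
  | [], _ => []
  | (s, e, i) :: rest, kC => if kC ≤ s then i :: pvCIdx rest e else pvCIdx rest kC

def pvJs : List (Int × Int × Int) → Int → List (Int × Int × Int)
  | [], _ => []
  | (s, e, i) :: rest, kC => if kC ≤ s then pvJs rest e else (s, e, i) :: pvJs rest kC

def pvChain : List (Int × Int × Int) → Int → Bool
  | [], _ => true
  | (s, e, _) :: rest, kJ => if s < kJ then false else pvChain rest e

-- A's loop only ever appends to its accumulator
theorem pvLoopA_acc (rest : List (Int × Int × Int)) : ∀ (kC kJ : Int) (acc : List (Char × Int)),
    pvLoopA rest kC kJ acc = (pvLoopA rest kC kJ []).map (acc ++ ·) := by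
  induction rest with
  | nil => intro kC kJ acc; simp [pvLoopA]
  | cons t rest ih =>
    obtain ⟨s, e, i⟩ := t
    intro kC kJ acc
    simp only [pvLoopA]
    split_ifs with h1 h2
    · rfl
    · rw [ih _ _ (acc ++ [('C', i)]), ih _ _ ([] ++ [('C', i)])]
      cases pvLoopA rest e kJ [] <;> simp
    · rw [ih _ _ (acc ++ [('J', i)]), ih _ _ ([] ++ [('J', i)])]
      cases pvLoopA rest kC e [] <;> simp

-- A's interleaved sweep, factored: it succeeds iff the leftover chain works for Jamie,
-- and then returns exactly the C-greedy labels
theorem pvLoopA_eq (L : List (Int × Int × Int)) : ∀ (kC kJ : Int),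
    pvLoopA L kC kJ [] = if pvChain (pvJs L kC) kJ then some (pvLabels L kC) else none := by
  induction L with
  | nil => intro kC kJ; simp [pvLoopA, pvJs, pvChain, pvLabels]
  | cons t rest ih =>
    obtain ⟨s, e, i⟩ := t
    intro kC kJ
    by_cases h2 : kC ≤ s
    · have h1 : ¬ (s < kC ∧ s < kJ) := by omega
      simp only [pvLoopA, if_neg h1, if_pos h2, pvJs, pvLabels]
      rw [pvLoopA_acc, ih]
      split_ifs <;> simp
    · by_cases h3 : s < kJ
      · have h1 : s < kC ∧ s < kJ := ⟨by omega, h3⟩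
        simp only [pvLoopA, if_pos h1, pvJs, if_neg h2, pvChain, if_pos h3]
        simp
      · have h1 : ¬ (s < kC ∧ s < kJ) := by omega
        simp only [pvLoopA, if_neg h1, if_neg h2, pvJs, pvLabels, pvChain, if_neg h3]
        rw [pvLoopA_acc, ih]
        split_ifs <;> simp

-- stage 1, factored into the pure index list and the leftover list
theorem pvStage1_eq (L : List (Int × Int × Int)) : ∀ (kC : Int) (d : PySem.Dict Int Char)
    (lo : List (Int × Int × Int)),
    pvStage1 L kC d lo = ((pvCIdx L kC).foldl (fun d i => d.insert i 'C') d, lo ++ pvJs L kC) := by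
  induction L with
  | nil => intro kC d lo; simp [pvStage1, pvCIdx, pvJs]
  | cons t rest ih =>
    obtain ⟨s, e, i⟩ := t
    intro kC d lo
    simp only [pvStage1, pvCIdx, pvJs]
    split_ifs with h
    · simp [ih]
    · simp [ih]

-- stage 2, factored: it is the chain check, inserting the Jamie letters on the way
theorem pvStage2_eq (M : List (Int × Int × Int)) : ∀ (kJ : Int) (d : PySem.Dict Int Char),
    pvStage2 M kJ d =
      if pvChain M kJ then some ((M.map (fun t => t.2.2)).foldl (fun d i => d.insert i 'J') d)
      else none := by
  induction M with
  | nil => intro kJ d; simp [pvStage2, pvChain]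
  | cons t rest ih =>
    obtain ⟨s, e, i⟩ := t
    intro kJ d
    by_cases h : s < kJ
    · simp [pvStage2, pvChain, h]
    · simp only [pvStage2, pvChain, if_neg h]
      rw [ih]
      simp

-- lookup misses a list none of whose keys is k
theorem lookup_none_of_not_key (ps : List (Int × Char)) (k : Int) :
    (∀ p ∈ ps, p.1 ≠ k) → ps.lookup k = none := by
  induction ps with
  | nil => intro _; rfl
  | cons p ps ih =>
    obtain ⟨a, v⟩ := p
    intro h
    have hb : (k == a) = false := by
      simpa using fun hh => h (a, v) (List.mem_cons_self ..) hh.symm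
    simp only [List.lookup, hb]
    exact ih fun q hq => h q (List.mem_cons_of_mem _ hq)

-- with pairwise-distinct keys, lookup finds the member
theorem lookup_of_mem (ps : List (Int × Char)) (k : Int) (c : Char) :
    (ps.map Prod.fst).Nodup → (k, c) ∈ ps → ps.lookup k = some c := by
  induction ps with
  | nil => intro _ h; simp at h
  | cons p ps ih =>
    obtain ⟨a, v⟩ := p
    intro hnd h
    simp only [List.map_cons, List.nodup_cons] at hnd
    rcases List.mem_cons.mp h with h | h
    · cases h; simp [List.lookup]
    · have hak : a ≠ k := fun hEq => hnd.1 (hEq ▸ List.mem_map_of_mem h)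
      have hb : (k == a) = false := by simpa using fun hh => hak hh.symm
      simp only [List.lookup, hb]
      exact ih hnd.2 h

-- lookup after a fold of inserts with pairwise-distinct keys = first match in the pair list,
-- else the original dict
theorem get?_scatter (ps : List (Int × Char)) : ∀ (d : PySem.Dict Int Char) (k : Int),
    (ps.map Prod.fst).Nodup →
    (ps.foldl (fun d p => d.insert p.1 p.2) d).get? k = ((ps.lookup k).or (d.get? k)) := by
  induction ps with
  | nil => intro d k _; simp
  | cons p ps ih =>
    obtain ⟨a, c⟩ := p
    intro d k hnd
    simp only [List.map_cons, List.nodup_cons] at hnd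
    simp only [List.foldl_cons]
    by_cases hak : a = k
    · subst hak
      rw [ih _ _ hnd.2,
        lookup_none_of_not_key ps a (fun q hq hEq => hnd.1 (hEq ▸ List.mem_map_of_mem hq)),
        PySem.Dict.get?_insert_self]
      simp [List.lookup]
    · have hb : (k == a) = false := by simpa using fun hh => hak hh.symm
      rw [ih _ _ hnd.2, PySem.Dict.get?_insert_of_ne _ _ (fun h => hak h.symm)]
      simp [List.lookup, hb]

-- a filterMap whose function always hits = the corresponding map
theorem filterMap_eq_map_of_eq_some {α β : Type} (l : List α) (f : α → Option β) (g : α → β) :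
    (∀ x ∈ l, f x = some (g x)) → l.filterMap f = l.map g := by
  induction l with
  | nil => intro _; rfl
  | cons a l ih =>
    intro h
    rw [List.filterMap_cons, h a (List.mem_cons_self ..), List.map_cons,
      ih fun x hx => h x (List.mem_cons_of_mem _ hx)]

-- the labels carry exactly the indices of the scanned triples, in order
theorem pvLabels_indices (L : List (Int × Int × Int)) : ∀ (kC : Int),
    (pvLabels L kC).map (·.2) = L.map (fun t => t.2.2) := by
  induction L with
  | nil => intro kC; simp [pvLabels]
  | cons t rest ih =>
    obtain ⟨s, e, i⟩ := t
    intro kC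
    simp only [pvLabels]
    split_ifs <;> simp [ih]

-- the (index, letter) pairs written by B are a permutation of A's labels (as pairs)
theorem pairs_perm (L : List (Int × Int × Int)) : ∀ (kC : Int),
    (((pvCIdx L kC).map (fun i => (i, 'C'))) ++ ((pvJs L kC).map (fun t => (t.2.2, 'J')))).Perm
      ((pvLabels L kC).map (fun p => (p.2, p.1))) := by
  induction L with
  | nil => intro kC; simp [pvCIdx, pvJs, pvLabels]
  | cons t rest ih =>
    obtain ⟨s, e, i⟩ := t
    intro kC
    simp only [pvCIdx, pvJs, pvLabels]
    split_ifs with h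
    · simpa using (ih e).cons (i, 'C')
    · simp only [List.map_cons]
      refine List.Perm.trans List.perm_middle ?_
      simpa using (ih kC).cons (i, 'J')

-- ===== VERDICT (by name: the statement is the Claim_ definition above) =====
theorem CameronJamie_spec : Claim_equal_CameronJamie := by
  intro p _
  unfold Spec_CameronJamie CameronJamie CameronJamie_alt
  simp only []
  set n := p.length with hn
  set T := PySem.List.sorted ((PySem.List.enumerate p).map (fun q => (q.2.1, q.2.2, q.1))) (fun x => x.1) false with hT
  rw [pvStage1_eq, pvLoopA_eq]
  simp only []
  rw [pvStage2_eq]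
  simp only [List.nil_append]
  -- indices of T are a permutation of range n (cast to Int)
  have hTidx : (T.map (fun t => t.2.2)).Perm ((List.range n).map (fun k : Nat => (k : Int))) := by
    have h2 : T.Perm ((PySem.List.enumerate p).map (fun q => (q.2.1, q.2.2, q.1))) :=
      PySem.List.sorted_perm _ _ _
    have h3 := h2.map (fun t => t.2.2)
    rw [List.map_map] at h3
    have h4 : ((PySem.List.enumerate p).map ((fun t => t.2.2) ∘ (fun q => (q.2.1, q.2.2, q.1))))
        = (PySem.List.enumerate p).map (fun q => q.1) := by
      apply List.map_congr_left; intro q _; rfl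
    rw [h4, PySem.List.map_fst_enumerate, zero_add, PySem.List.pyRange_zero_natCast] at h3
    exact h3
  cases hc : pvChain (pvJs T 0) 0 with
  | false => simp
  | true =>
    rw [if_pos rfl, if_pos rfl]
    set ps := pvLabels T 0 with hps
    set S := PySem.List.sorted ps (fun x => x.2) false with hS
    have hSp : S.Perm ps := PySem.List.sorted_perm _ _ _
    have hpsIdx : (ps.map (·.2)).Perm ((List.range n).map (fun k : Nat => (k : Int))) := by
      rw [hps, pvLabels_indices]; exact hTidx
    -- the sorted letter list has index list exactly range n
    have hSeq : S.map (fun q => q.2) = (List.range n).map (fun k : Nat => (k : Int)) := by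
      refine List.Perm.eq_of_pairwise (fun a b _ _ hab hba => le_antisymm hab hba)
        ?_ ?_ ((hSp.map _).trans hpsIdx)
      · exact PySem.List.sorted_map_key_pairwise ps (fun x => x.2)
      · refine List.Pairwise.map _ (fun a b h => ?_) (List.pairwise_lt_range (n := n))
        exact_mod_cast le_of_lt h
    have hSlen : S.length = n := by
      have := congrArg List.length hSeq; simpa using this
    -- key-nodup of the label pairs
    have hndlbl : ((ps.map (fun q => (q.2, q.1))).map Prod.fst).Nodup := by
      have h1 : (ps.map (fun q => (q.2, q.1))).map Prod.fst = ps.map (·.2) := by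
        rw [List.map_map]; rfl
      rw [h1]
      exact hpsIdx.nodup_iff.mpr
        (List.Nodup.map (fun a b => by exact_mod_cast (·)) List.nodup_range)
    -- B's scatter pairs
    set bp := (((pvCIdx T 0).map (fun i => (i, 'C'))) ++ ((pvJs T 0).map (fun t => (t.2.2, 'J')))) with hbp
    have hbperm : bp.Perm (ps.map (fun q => (q.2, q.1))) := by rw [hbp, hps]; exact pairs_perm T 0
    have hndbp : (bp.map Prod.fst).Nodup := (hbperm.map Prod.fst).nodup_iff.mpr hndlbl
    -- B's dict = fold of bp over empty
    have hdict : ((pvJs T 0).map (fun t => t.2.2)).foldl (fun d i => d.insert i 'J')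
          ((pvCIdx T 0).foldl (fun d i => d.insert i 'C') PySem.Dict.empty)
        = bp.foldl (fun d q => d.insert q.1 q.2) PySem.Dict.empty := by
      rw [hbp, List.foldl_append]
      simp [List.foldl_map]
    rw [hdict, PySem.List.pyRange_zero_natCast]
    -- read each slot off by lookup
    have hchars : ∀ (k : Nat) (hk : k < n),
        (bp.foldl (fun d q => d.insert q.1 q.2) PySem.Dict.empty).get? (k : Int)
          = some ((S[k]'(by rw [hSlen]; exact hk)).1) := by
      intro k hk
      rw [get?_scatter bp PySem.Dict.empty (k : Int) hndbp]
      have hkS : k < S.length := by rw [hSlen]; exact hk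
      have hidx : (S[k]'hkS).2 = (k : Int) := by
        have h1 : (S.map (fun q => q.2))[k]'(by simpa using hkS)
            = ((List.range n).map (fun j : Nat => (j : Int)))[k]'(by simpa using hk) := by
          simp only [hSeq]
        simpa using h1
      have hmem : ((k : Int), (S[k]'hkS).1) ∈ bp := by
        apply hbperm.mem_iff.mpr
        apply List.mem_map.mpr
        refine ⟨S[k]'hkS, hSp.mem_iff.mp (List.getElem_mem _), ?_⟩
        rw [hidx]
      rw [lookup_of_mem bp (k : Int) _ hndbp hmem]
      simp
    -- the joined characters = A's folded string
    have hright : (List.range n).filterMap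
          ((fun k => (bp.foldl (fun d q => d.insert q.1 q.2) PySem.Dict.empty).get? k) ∘ (fun k : Nat => (k : Int)))
        = S.map (fun q => q.1) := by
      rw [filterMap_eq_map_of_eq_some (List.range n) _ (fun k => (S.getD k ('C', 0)).1)
        (by
          intro k hk
          have hkn : k < n := List.mem_range.mp hk
          have hkS : k < S.length := by rw [hSlen]; exact hkn
          simp only [Function.comp]
          rw [hchars k hkn, List.getD_eq_getElem S ('C', 0) hkS])]
      apply List.ext_getElem
      · simp [hSlen]
      · intro k hk1 hk2
        have hkS : k < S.length := by simpa using hk2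
        simp [List.getD, List.getElem?_eq_getElem hkS]
    show String.ofList ((PySem.List.sorted ps (fun x => x.2) false).foldl (fun acc p => acc ++ [p.1]) [])
        = String.ofList (((List.range n).map (fun k : Nat => (k : Int))).filterMap
            (fun k => (bp.foldl (fun d q => d.insert q.1 q.2) PySem.Dict.empty).get? k))
    rw [List.filterMap_map, hright, PySem.List.foldl_append_singleton_eq_map]
    simp only [List.nil_append]
    rfl
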